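-- pv_equiv track=rewrite | github.com/mayurandhare13/coding-pattern | 18. Extras/m2.py | dfsBits
-- ===== SOURCE A (Python) =====
-- def dfsBits(opt: list[int], pos: int, res: int):
--     # separate parts of bitset into string bits and its len
--     oldchars = res & ((1 << 26) - 1)
--     oldlen = res >> 26
--
--     best = oldlen
--
--     for i in range(pos, len(opt)):
--         newchars = opt[i] & ((1 << 26) - 1)
--         newlen = opt[i] >> 26
--
--         # If the two bitsets overlap, skip to the next result
--         if newchars & oldchars:
--             continue
--
--         newres = oldchars | newchars | ((oldlen + newlen) << 26)
--         best = max(best, dfsBits(opt, i + 1, newres))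
--
--     return best
-- ===== SOURCE B (Python) =====
-- def dfsBits(opt: list[int], pos: int, res: int):
--     # Iterative enumeration: build every reachable disjoint-union state once,
--     # in a growing list, instead of recursive backtracking.
--     mask = (1 << 26) - 1
--     reachable = [(res & mask, res >> 26)]
--     best = res >> 26
--     for i in range(pos, len(opt)):
--         chars = opt[i] & mask
--         length = opt[i] >> 26
--         new = [(m | chars, l + length) for (m, l) in reachable if m & chars == 0]
--         for (_, l) in new:
--             best = max(best, l)
--         reachable += new
--     return best
-- ===== Notes on version B (the rewrite author's own statement) =====
-- stated objective: alternative
-- what changed: Recursive backtracking over suffixes (re-decoding each packed result and recursing per pick) is replaced by a single forward pass that grows an explicit list of all reachable disjoint-union (mask, length) states and tracks the running best.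
import Mathlib
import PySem

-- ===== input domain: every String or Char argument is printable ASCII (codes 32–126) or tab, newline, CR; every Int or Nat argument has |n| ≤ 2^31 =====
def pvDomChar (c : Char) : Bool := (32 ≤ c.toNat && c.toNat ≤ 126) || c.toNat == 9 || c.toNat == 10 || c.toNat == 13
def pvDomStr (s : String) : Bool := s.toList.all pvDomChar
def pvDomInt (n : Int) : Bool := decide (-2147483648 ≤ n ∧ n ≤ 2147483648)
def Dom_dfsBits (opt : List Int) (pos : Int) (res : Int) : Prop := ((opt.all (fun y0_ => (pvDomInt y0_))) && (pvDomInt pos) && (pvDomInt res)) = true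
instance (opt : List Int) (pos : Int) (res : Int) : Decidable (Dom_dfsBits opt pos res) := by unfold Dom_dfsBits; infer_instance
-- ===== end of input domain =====

-- B replaces A's recursive backtracking over suffixes by a single forward pass that grows
-- a list of all reachable disjoint-union states (objective: alternative algorithm/data structure).

-- ===== PORT A =====
-- (1 << 26) - 1
def pvMask : Int := ((1 : Int) <<< (26 : Nat)) - 1

-- the `for i in range(pos, len(opt))` loop of A; the recursive call `dfsBits(opt, i+1, newres)`
-- is inlined (decode of newres, then the loop over range(i+1, len(opt))), with a fuel argument
-- only to justify termination (never exhausted at the fuel dfsBits supplies).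
def loopA (opt : List Int) (fuel : Nat) (idxs : List Int) (chars len0 best : Int) : Int :=
  match idxs with
  | [] => best
  | i :: rest =>
    let v := (PySem.List.pyGet? opt i).getD 0   -- opt[i]; IndexError excluded by Pre_
    let newchars := PySem.Int.band v pvMask
    let newlen := v >>> (26 : Nat)
    if PySem.Int.band newchars chars ≠ 0 then
      loopA opt fuel rest chars len0 best
    else
      let newres := PySem.Int.bor (PySem.Int.bor chars newchars) ((len0 + newlen) <<< (26 : Nat))
      let sub :=
        if fuel = 0 then 0
        else
          loopA opt (fuel - 1) (PySem.List.pyRange (i + 1) (opt.length : Int) 1)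
            (PySem.Int.band newres pvMask) (newres >>> (26 : Nat)) (newres >>> (26 : Nat))
      loopA opt fuel rest chars len0 (max best sub)
termination_by (fuel, idxs.length)

def dfsBits (opt : List Int) (pos : Int) (res : Int) : Int :=
  let oldchars := PySem.Int.band res pvMask
  let oldlen := res >>> (26 : Nat)
  loopA opt ((opt.length : Int) - pos).toNat (PySem.List.pyRange pos (opt.length : Int) 1)
    oldchars oldlen oldlen

-- ===== PORT B =====
-- one loop iteration of B: extend every disjoint reachable state by opt[i], update best
def stepB (opt : List Int) (st : List (Int × Int) × Int) (i : Int) : List (Int × Int) × Int :=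
  let v := (PySem.List.pyGet? opt i).getD 0   -- opt[i]; IndexError excluded by Pre_
  let chars := PySem.Int.band v pvMask
  let length := v >>> (26 : Nat)
  let news := (st.1.filter (fun p => PySem.Int.band p.1 chars == 0)).map
      (fun p => (PySem.Int.bor p.1 chars, p.2 + length))
  (st.1 ++ news, news.foldl (fun b p => max b p.2) st.2)

def dfsBits_alt (opt : List Int) (pos : Int) (res : Int) : Int :=
  let oldchars := PySem.Int.band res pvMask
  let oldlen := res >>> (26 : Nat)
  ((PySem.List.pyRange pos (opt.length : Int) 1).foldl (stepB opt) ([(oldchars, oldlen)], oldlen)).2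

-- ===== PRECONDITION & SPEC =====
-- excludes exactly the inputs where Python A raises IndexError: pos < -len(opt) makes the
-- first iteration read opt[pos] out of range (for -len ≤ pos < 0 both programs use Python's
-- negative-index read and still agree, so those stay inside).
def Pre_dfsBits (opt : List Int) (pos : Int) (res : Int) : Prop := -(opt.length : Int) ≤ pos
instance (opt : List Int) (pos : Int) (res : Int) : Decidable (Pre_dfsBits opt pos res) := by
  unfold Pre_dfsBits; infer_instance

def pvWitness_dfsBits : List Int × Int × Int := ([67108865, 134217730, 201326593], 0, 0)

def Spec_dfsBits (opt : List Int) (pos : Int) (res : Int) (out : Int) : Prop := out = dfsBits_alt opt pos res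
instance (opt : List Int) (pos : Int) (res : Int) (out : Int) : Decidable (Spec_dfsBits opt pos res out) := by unfold Spec_dfsBits; infer_instance

-- ===== CLAIM (what is proved, stated in full; the proofs are below) =====
def Claim_equal_dfsBits : Prop := ∀ (opt : List Int) (pos : Int) (res : Int), Dom_dfsBits opt pos res → Pre_dfsBits opt pos res → Spec_dfsBits opt pos res (dfsBits opt pos res)

-- ===== LEMMAS AND PROOFS =====

-- decoded (character-mask, length) pair of opt[i]
def pvDec (opt : List Int) (i : Int) : Int × Int :=
  let v := (PySem.List.pyGet? opt i).getD 0
  (PySem.Int.band v pvMask, v >>> (26 : Nat))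

-- best total length over all prefix-disjoint chains drawn from `items`, starting from (ch, l)
def pvF : List (Int × Int) → Int → Int → Int
  | [], _, l => l
  | (c, ln) :: rest, ch, l =>
    if PySem.Int.band c ch ≠ 0 then pvF rest ch l
    else max (pvF rest ch l) (pvF rest (PySem.Int.bor ch c) (l + ln))

def pvCombos (S : List (Int × Int)) (c l : Int) : List (Int × Int) :=
  (S.filter (fun p => PySem.Int.band p.1 c == 0)).map (fun p => (PySem.Int.bor p.1 c, p.2 + l))

def pvBest (b : Int) (S : List (Int × Int)) : Int := S.foldl (fun x p => max x p.2) b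

-- max length over all states reachable from the state list S through `items`
def pvG : List (Int × Int) → List (Int × Int) → Int → Int
  | [], S, b => pvBest b S
  | (c, l) :: items, S, b => pvG items (S ++ pvCombos S c l) b

-- the same with best threaded through, mirroring B's fold state
def pvG' : List (Int × Int) → List (Int × Int) → Int → Int
  | [], _, b => b
  | (c, l) :: items, S, b => pvG' items (S ++ pvCombos S c l) (pvBest b (pvCombos S c l))

-- ---- Nat bit lemmas ----

lemma pv_tb (x i : Nat) : x.testBit i = decide (x / 2 ^ i % 2 = 1) := by
  simp only [Nat.testBit, Nat.shiftRight_eq_div_pow, Nat.one_and_eq_mod_two,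
    Nat.mod_two_bne_zero]
  rcases Nat.mod_two_eq_zero_or_one (x / 2 ^ i) with h | h <;> simp [h]

lemma pv_tb_add {t : Nat} (m : Nat) {n : Nat} (ht : t < 2 ^ n) (i : Nat) :
    (m * 2 ^ n + t).testBit i = if i < n then t.testBit i else m.testBit (i - n) := by
  simp only [pv_tb]
  by_cases h : i < n
  · rw [if_pos h]
    have h2 : (2 : Nat) ^ n = 2 ^ (n - i) * 2 ^ i := by rw [← pow_add]; congr 1; omega
    rw [show m * 2 ^ n + t = t + m * 2 ^ (n - i) * 2 ^ i by rw [h2]; ring,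
        Nat.add_mul_div_right _ _ (by positivity : 0 < 2 ^ i)]
    have h4 : m * 2 ^ (n - i) = 2 * (m * 2 ^ (n - i - 1)) := by
      rw [show (2 : Nat) ^ (n - i) = 2 * 2 ^ (n - i - 1) by rw [← pow_succ']; congr 1; omega]
      ring
    have h5 : (t / 2 ^ i + 2 * (m * 2 ^ (n - i - 1))) % 2 = t / 2 ^ i % 2 := by omega
    rw [h4, h5]
  · rw [if_neg h]
    have h6 : (2 : Nat) ^ i = 2 ^ n * 2 ^ (i - n) := by rw [← pow_add]; congr 1; omega
    rw [show m * 2 ^ n + t = t + m * 2 ^ n by ring, h6, ← Nat.div_div_eq_div_mul,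
        Nat.add_mul_div_right _ _ (by positivity : 0 < 2 ^ n), Nat.div_eq_of_lt ht,
        Nat.zero_add]

lemma pv_lor_add {t : Nat} (m : Nat) {n : Nat} (ht : t < 2 ^ n) :
    t ||| m * 2 ^ n = m * 2 ^ n + t := by
  apply Nat.eq_of_testBit_eq
  intro i
  have hm0 : (m * 2 ^ n).testBit i = if i < n then (0 : Nat).testBit i else m.testBit (i - n) := by
    simpa using pv_tb_add m (by positivity : (0 : Nat) < 2 ^ n) i
  rw [Nat.testBit_lor, pv_tb_add m ht i, hm0]
  by_cases h : i < n
  · simp [h]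
  · have hti : t.testBit i = false := Nat.testBit_lt_two_pow
      (lt_of_lt_of_le ht (Nat.pow_le_pow_right (by norm_num) (Nat.le_of_not_lt h)))
    simp [h, hti]

lemma pv_and_low (k : Nat) {t n : Nat} (ht : t < 2 ^ n) :
    (k * 2 ^ n + (2 ^ n - 1)) &&& t = t := by
  apply Nat.eq_of_testBit_eq
  intro i
  have h0 : (0 : Nat) < 2 ^ n := by positivity
  have hmask : (2 : Nat) ^ n - 1 < 2 ^ n := by omega
  rw [Nat.testBit_land, pv_tb_add k hmask i]
  by_cases h : i < n
  · simp [h, Nat.testBit_two_pow_sub_one]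
  · have hti : t.testBit i = false := Nat.testBit_lt_two_pow
      (lt_of_lt_of_le ht (Nat.pow_le_pow_right (by norm_num) (Nat.le_of_not_lt h)))
    simp [h, hti]

-- ---- Int decode lemmas ----

lemma pv_mask_eq : pvMask = 2 ^ 26 - 1 := by decide

lemma pv_bor_shift {x : Int} (m : Int) (hx0 : 0 ≤ x) (hx : x < 2 ^ 26) :
    PySem.Int.bor x (m <<< (26 : Nat)) = m * 2 ^ 26 + x := by
  rw [Int.shiftLeft_eq]
  by_cases hm : 0 ≤ m
  · obtain ⟨m', rfl⟩ := Int.eq_ofNat_of_zero_le hm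
    obtain ⟨t, rfl⟩ := Int.eq_ofNat_of_zero_le hx0
    have ht : t < 2 ^ 26 := by exact_mod_cast hx
    rw [show ((m' : Int) * 2 ^ 26) = ((m' * 2 ^ 26 : Nat) : Int) by push_cast; ring,
        PySem.Int.bor_natCast, pv_lor_add m' ht]
    push_cast
    ring
  · rw [not_le] at hm
    have hb : m * 2 ^ 26 < 0 := mul_neg_of_neg_of_pos hm (by norm_num)
    simp only [PySem.Int.bor, if_pos hx0, if_neg (not_le.2 hb)]
    set k : Nat := (-m - 1).toNat with hk
    have hm' : m = -(k : Int) - 1 := by omega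
    have h1 : (-(m * 2 ^ 26) - 1).toNat = k * 2 ^ 26 + (2 ^ 26 - 1) := by
      rw [hm']; push_cast; omega
    rw [h1, pv_and_low k (show x.toNat < 2 ^ 26 by omega)]
    omega

lemma pv_band_mask {x : Int} (m : Int) (hx0 : 0 ≤ x) (hx : x < 2 ^ 26) :
    PySem.Int.band (m * 2 ^ 26 + x) pvMask = x := by
  by_cases hm : 0 ≤ m
  · have ha : 0 ≤ m * 2 ^ 26 + x := by positivity
    rw [PySem.Int.band_of_nonneg ha (by decide)]
    have h2 : (m * 2 ^ 26 + x).toNat = m.toNat * 2 ^ 26 + x.toNat := by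
      rw [show m = (m.toNat : Int) from (Int.toNat_of_nonneg hm).symm] at *
      push_cast
      omega
    have h3 : pvMask.toNat = 2 ^ 26 - 1 := by decide
    rw [h2, h3, Nat.and_two_pow_sub_one_eq_mod, Nat.mul_comm m.toNat, Nat.mul_add_mod,
        Nat.mod_eq_of_lt (by omega : x.toNat < 2 ^ 26)]
    omega
  · rw [not_le] at hm
    have ha : m * 2 ^ 26 + x < 0 := by nlinarith
    simp only [PySem.Int.band, if_neg (not_le.2 ha), if_pos (by decide : (0 : Int) ≤ pvMask)]
    set k : Nat := (-m - 1).toNat with hk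
    have hm' : m = -(k : Int) - 1 := by omega
    have h1 : (-(m * 2 ^ 26 + x) - 1).toNat = k * 2 ^ 26 + (2 ^ 26 - 1 - x.toNat) := by
      rw [hm']; push_cast; omega
    have h3 : pvMask.toNat = 2 ^ 26 - 1 := by decide
    rw [h1, h3, Nat.land_comm, Nat.and_two_pow_sub_one_eq_mod, Nat.mul_comm k, Nat.mul_add_mod,
        Nat.mod_eq_of_lt (by omega : 2 ^ 26 - 1 - x.toNat < 2 ^ 26)]
    omega

lemma pv_shr {x : Int} (m : Int) (hx0 : 0 ≤ x) (hx : x < 2 ^ 26) :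
    (m * 2 ^ 26 + x) >>> (26 : Nat) = m := by
  rw [Int.shiftRight_eq_div_pow, add_comm, show ((2 ^ 26 : Nat) : Int) = (2 : Int) ^ 26 from by
        norm_num,
      Int.add_mul_ediv_right _ _ (by norm_num : (2 : Int) ^ 26 ≠ 0),
      Int.ediv_eq_zero_of_lt hx0 hx, zero_add]

lemma pv_band_bounds (a b : Int) (hb : 0 ≤ b) :
    0 ≤ PySem.Int.band a b ∧ PySem.Int.band a b ≤ b := by
  simp only [PySem.Int.band]
  split_ifs <;> first
  | omega
  | (have := @Nat.and_le_right a.toNat b.toNat; omega)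

lemma pv_bor_bounds {a b : Int} (ha0 : 0 ≤ a) (ha : a ≤ pvMask) (hb0 : 0 ≤ b) (hb : b ≤ pvMask) :
    0 ≤ PySem.Int.bor a b ∧ PySem.Int.bor a b ≤ pvMask := by
  rw [pv_mask_eq] at *
  rw [PySem.Int.bor_of_nonneg ha0 hb0]
  have := Nat.or_lt_two_pow (x := a.toNat) (y := b.toNat) (n := 26) (by omega) (by omega)
  omega

-- ---- pvF, pvBest, pvG facts ----

lemma pv_F_ge (items : List (Int × Int)) (ch l : Int) : l ≤ pvF items ch l := by
  induction items generalizing ch l with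
  | nil => simp [pvF]
  | cons p rest ih =>
    obtain ⟨c, ln⟩ := p
    simp only [pvF]
    split
    · exact ih ch l
    · exact le_max_of_le_left (ih ch l)

lemma pv_best_cons (b : Int) (p : Int × Int) (S : List (Int × Int)) :
    pvBest b (p :: S) = pvBest (max b p.2) S := rfl

lemma pv_best_le (b : Int) (S : List (Int × Int)) : b ≤ pvBest b S := by
  induction S generalizing b with
  | nil => simp [pvBest]
  | cons p S ih => exact le_trans (le_max_left _ _) (ih (max b p.2))

lemma pv_best_append (b : Int) (S T : List (Int × Int)) :
    pvBest b (S ++ T) = pvBest (pvBest b S) T := by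
  simp [pvBest, List.foldl_append]

lemma pv_best_max_left (b c : Int) (S : List (Int × Int)) :
    pvBest (max b c) S = max (pvBest b S) c := by
  induction S generalizing b with
  | nil => simp [pvBest]
  | cons p S ih =>
    rw [pv_best_cons, pv_best_cons, show max (max b c) p.2 = max (max b p.2) c by omega, ih]

lemma pv_best_split (b : Int) (S T : List (Int × Int)) :
    pvBest b (S ++ T) = max (pvBest b S) (pvBest b T) := by
  induction S generalizing b with
  | nil =>
    have h := pv_best_le b T
    have h0 : pvBest b ([] : List (Int × Int)) = b := rfl
    simp only [List.nil_append, h0]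
    omega
  | cons p S ih =>
    rw [List.cons_append, pv_best_cons, pv_best_cons, ih]
    have h2 := pv_best_max_left b p.2 T
    have h1 := pv_best_le (max b p.2) S
    omega

lemma pv_best_perm (b : Int) {S S' : List (Int × Int)} (h : S.Perm S') :
    pvBest b S = pvBest b S' := by
  induction h generalizing b with
  | nil => rfl
  | cons x _ ih => rw [pv_best_cons, pv_best_cons, ih]
  | swap x y l =>
    rw [pv_best_cons, pv_best_cons, pv_best_cons, pv_best_cons,
      show max (max b y.2) x.2 = max (max b x.2) y.2 by omega]
  | trans _ _ ih1 ih2 => exact (ih1 b).trans (ih2 b)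

lemma pv_combos_append (S T : List (Int × Int)) (c l : Int) :
    pvCombos (S ++ T) c l = pvCombos S c l ++ pvCombos T c l := by
  simp [pvCombos]

lemma pv_combos_perm {S S' : List (Int × Int)} (h : S.Perm S') (c l : Int) :
    (pvCombos S c l).Perm (pvCombos S' c l) := by
  exact (h.filter _).map _

lemma pv_G_perm (items : List (Int × Int)) {S S' : List (Int × Int)} (h : S.Perm S') (b : Int) :
    pvG items S b = pvG items S' b := by
  induction items generalizing S S' with
  | nil => exact pv_best_perm b h
  | cons p items ih =>
    obtain ⟨c, l⟩ := p
    exact ih (h.append (pv_combos_perm h c l))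

lemma pv_G_split (items : List (Int × Int)) (S T : List (Int × Int)) (b : Int) :
    pvG items (S ++ T) b = max (pvG items S b) (pvG items T b) := by
  induction items generalizing S T with
  | nil => exact pv_best_split b S T
  | cons p items ih =>
    obtain ⟨c, l⟩ := p
    simp only [pvG, pv_combos_append]
    have key : (T ++ (pvCombos S c l ++ pvCombos T c l)).Perm
        (pvCombos S c l ++ (T ++ pvCombos T c l)) := by
      have h := (List.perm_append_comm (l₁ := T) (l₂ := pvCombos S c l)).append_right
        (pvCombos T c l)
      simpa [List.append_assoc] using h
    have hperm : ((S ++ T) ++ (pvCombos S c l ++ pvCombos T c l)).Perm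
        ((S ++ pvCombos S c l) ++ (T ++ pvCombos T c l)) := by
      have h := key.append_left S
      simpa [List.append_assoc] using h
    rw [pv_G_perm items hperm b]
    exact ih (S ++ pvCombos S c l) (T ++ pvCombos T c l)

lemma pv_G_singleton (items : List (Int × Int)) (c l b : Int) :
    pvG items [(c, l)] b = max b (pvF items c l) := by
  induction items generalizing c l b with
  | nil => simp [pvG, pvBest, pvF]
  | cons p items ih =>
    obtain ⟨ci, li⟩ := p
    simp only [pvG, pvF]
    by_cases h : PySem.Int.band ci c ≠ 0
    · have hc : pvCombos [(c, l)] ci li = [] := by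
        simp [pvCombos, PySem.Int.band_comm c ci, h]
      rw [hc, if_pos h]
      simpa using ih c l b
    · simp only [ne_eq, not_not] at h
      have hc : pvCombos [(c, l)] ci li = [(PySem.Int.bor c ci, l + li)] := by
        simp [pvCombos, PySem.Int.band_comm c ci, h]
      rw [hc, if_neg (by simpa using h)]
      have hs := pv_G_split items [(c, l)] [(PySem.Int.bor c ci, l + li)] b
      simp only [List.singleton_append] at hs ⊢
      rw [hs, ih, ih]
      omega

lemma pv_G'_eq (items S : List (Int × Int)) (b : Int) :
    pvG' items S (pvBest b S) = pvG items S b := by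
  induction items generalizing S b with
  | nil => simp [pvG, pvG']
  | cons p items ih =>
    obtain ⟨c, l⟩ := p
    simp only [pvG, pvG']
    rw [← pv_best_append, ih]

-- ---- bridging the ports ----

lemma pv_foldB (opt : List Int) (idxs : List Int) (S : List (Int × Int)) (b : Int) :
    (idxs.foldl (stepB opt) (S, b)).2 = pvG' (idxs.map (pvDec opt)) S b := by
  induction idxs generalizing S b with
  | nil => simp [pvG']
  | cons i idxs ih =>
    simp only [List.foldl_cons, List.map_cons, stepB, pvG', pvDec, pvCombos, pvBest]
    exact ih _ _

lemma pv_loopA_spec (opt : List Int) :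
    ∀ n (p : Int), ((opt.length : Int) - p).toNat = n → ∀ (fuel : Nat), n ≤ fuel →
    ∀ ch l best : Int, l ≤ best → 0 ≤ ch → ch ≤ pvMask →
    loopA opt fuel (PySem.List.pyRange p (opt.length : Int) 1) ch l best =
      max best (pvF ((PySem.List.pyRange p (opt.length : Int) 1).map (pvDec opt)) ch l) := by
  intro n
  induction n with
  | zero =>
    intro p hp fuel _ ch l best hlb _ _
    rw [PySem.List.pyRange_one_eq_nil (by omega)]
    simp [loopA, pvF]
    omega
  | succ n ih =>
    intro p hp fuel hfuel ch l best hlb hch0 hch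
    have hpl : p < (opt.length : Int) := by omega
    rw [PySem.List.pyRange_one_cons hpl]
    simp only [loopA, List.map_cons]
    set v := (PySem.List.pyGet? opt p).getD 0 with hv
    have hdec : pvDec opt p = (PySem.Int.band v pvMask, v >>> (26 : Nat)) := rfl
    rw [hdec]
    set nc := PySem.Int.band v pvMask with hnc
    set nl := v >>> (26 : Nat) with hnl
    by_cases hov : PySem.Int.band nc ch ≠ 0
    · rw [if_pos hov]
      rw [ih (p + 1) (by omega) fuel (by omega) ch l best hlb hch0 hch]
      simp only [pvF]
      rw [if_pos hov]
    · rw [if_neg hov]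
      simp only [ne_eq, not_not] at hov
      have hf0 : ¬ fuel = 0 := by omega
      rw [if_neg hf0]
      have hnc0 : 0 ≤ nc := (pv_band_bounds v pvMask (by decide)).1
      have hncm : nc ≤ pvMask := (pv_band_bounds v pvMask (by decide)).2
      obtain ⟨hx0, hxm⟩ := pv_bor_bounds hch0 hch hnc0 hncm
      set x := PySem.Int.bor ch nc with hx
      have hxlt : x < 2 ^ 26 := by rw [pv_mask_eq] at hxm; omega
      have hrw : PySem.Int.bor x ((l + nl) <<< (26 : Nat)) = (l + nl) * 2 ^ 26 + x :=
        pv_bor_shift (l + nl) hx0 hxlt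
      rw [hrw, pv_band_mask (l + nl) hx0 hxlt, pv_shr (l + nl) hx0 hxlt]
      rw [ih (p + 1) (by omega) (fuel - 1) (by omega) x (l + nl) (l + nl) le_rfl hx0 hxm]
      rw [ih (p + 1) (by omega) fuel (by omega) ch l
        (max best (max (l + nl) (pvF ((PySem.List.pyRange (p+1) (opt.length : Int) 1).map (pvDec opt)) x (l + nl))))
        (by omega) hch0 hch]
      simp only [pvF]
      rw [if_neg (by simpa using hov), ← hx]
      have hge := pv_F_ge ((PySem.List.pyRange (p+1) (opt.length : Int) 1).map (pvDec opt)) x (l + nl)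
      omega

-- ===== VERDICT (by name: the statement is the Claim_ definition above) =====
theorem dfsBits_spec : Claim_equal_dfsBits := by
  intro opt pos res _ _
  unfold Spec_dfsBits
  show dfsBits opt pos res = dfsBits_alt opt pos res
  have hoc := pv_band_bounds res pvMask (by decide)
  set oc := PySem.Int.band res pvMask with hocd
  set ol := res >>> (26 : Nat) with hold
  set items := (PySem.List.pyRange pos ((opt.length : Int)) 1).map (pvDec opt) with hitems
  have h1 : pvBest ol [(oc, ol)] = ol := by simp [pvBest]
  have hB : dfsBits_alt opt pos res = pvG' items [(oc, ol)] ol := by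
    unfold dfsBits_alt
    exact pv_foldB opt _ [(oc, ol)] ol
  have hB2 : pvG' items [(oc, ol)] ol = max ol (pvF items oc ol) := by
    calc pvG' items [(oc, ol)] ol = pvG' items [(oc, ol)] (pvBest ol [(oc, ol)]) := by rw [h1]
      _ = pvG items [(oc, ol)] ol := pv_G'_eq items [(oc, ol)] ol
      _ = max ol (pvF items oc ol) := pv_G_singleton items oc ol ol
  have hA : dfsBits opt pos res = max ol (pvF items oc ol) := by
    unfold dfsBits
    exact pv_loopA_spec opt (((opt.length : Int) - pos).toNat) pos rfl _ le_rfl oc ol ol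
      le_rfl hoc.1 hoc.2
  rw [hA, hB, hB2]
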